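-- pv_equiv track=rewrite | github.com/wandb/docs | scripts/generate_cheat_sheet.py | organize_by_main_category
-- ===== SOURCE A (Python) =====
-- from typing import Dict, List, Optional
--
-- def map_to_main_categories(category: str) -> str:
--     """Map detailed categories to main category pages."""
--     if category.startswith('Artifact'):
--         return 'Artifacts'
--     elif category.startswith('Registry'):
--         return 'Registry'
--     elif category == 'Logging':
--         return 'Logging'
--     elif category == 'Run Management':
--         return 'Runs'
--     else:
--         return 'Other'
--
-- def organize_by_main_category(tasks: List[Dict]) -> Dict[str, Dict[str, List[Dict]]]:
--     """Organize tasks by main category and subcategory."""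
--     organized = {}
--     for task in tasks:
--         main_cat = map_to_main_categories(task['category'])
--         sub_cat = task['category']
--
--         if main_cat not in organized:
--             organized[main_cat] = {}
--         if sub_cat not in organized[main_cat]:
--             organized[main_cat][sub_cat] = []
--
--         organized[main_cat][sub_cat].append(task)
--
--     return organized
-- ===== SOURCE B (Python) =====
-- from typing import Dict, List
--
-- def map_to_main_categories(category: str) -> str:
--     """Map detailed categories to main category pages."""
--     if category.startswith('Artifact'):
--         return 'Artifacts'
--     elif category.startswith('Registry'):
--         return 'Registry'
--     elif category == 'Logging':
--         return 'Logging'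
--     elif category == 'Run Management':
--         return 'Runs'
--     else:
--         return 'Other'
--
-- def organize_by_main_category(tasks: List[Dict]) -> Dict[str, Dict[str, List[Dict]]]:
--     """Organize tasks by main category and subcategory (grouping by distinct categories)."""
--     cats = list(dict.fromkeys(t['category'] for t in tasks))
--     mains = list(dict.fromkeys(map(map_to_main_categories, cats)))
--     return {mc: {c: [t for t in tasks if t['category'] == c]
--                  for c in cats if map_to_main_categories(c) == mc}
--             for mc in mains}
-- ===== Notes on version B (the rewrite author's own statement) =====
-- stated objective: alternative
-- what changed: B replaces A's incremental scan-and-append into nested dicts by a grouping computation: it first deduplicates the category list (dict.fromkeys) and the derived main-category list, then builds the whole nested dict with comprehensions that filter the task list per category.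
import Mathlib
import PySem

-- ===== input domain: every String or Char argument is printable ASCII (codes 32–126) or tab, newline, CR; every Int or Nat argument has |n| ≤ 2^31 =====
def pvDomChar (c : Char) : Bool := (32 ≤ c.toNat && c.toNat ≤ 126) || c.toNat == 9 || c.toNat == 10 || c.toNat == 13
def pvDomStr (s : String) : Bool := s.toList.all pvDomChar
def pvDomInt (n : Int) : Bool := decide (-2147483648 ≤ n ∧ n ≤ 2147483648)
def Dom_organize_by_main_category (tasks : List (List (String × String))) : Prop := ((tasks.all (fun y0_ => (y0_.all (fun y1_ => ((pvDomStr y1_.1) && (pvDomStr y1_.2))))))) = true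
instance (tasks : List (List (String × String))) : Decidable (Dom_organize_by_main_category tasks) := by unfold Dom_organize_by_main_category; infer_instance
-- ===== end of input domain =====

-- B builds the same nested grouping by a different decomposition: it deduplicates the category list
-- and the derived main-category list first, then produces the result with per-category filtering,
-- instead of A's task-by-task scan-and-append into nested dicts.

-- ===== PORT A =====
-- shared module helper map_to_main_categories (used verbatim by both Pythons)
def map_to_main_categories (category : String) : String :=
  if PySem.Str.startswith category "Artifact" then "Artifacts"
  else if PySem.Str.startswith category "Registry" then "Registry"
  else if category = "Logging" then "Logging"
  else if category = "Run Management" then "Runs"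
  else "Other"

-- task['category']: first-match lookup; the "" default is never reached under Pre_ (a missing key is a KeyError in Python)
def pvGetCat (task : List (String × String)) : String :=
  (PySem.Dict.mk task).getD "category" ""

-- the body of A's 'for task in tasks' loop
def orgStep (organized : PySem.Dict String (PySem.Dict String (List (List (String × String)))))
    (task : List (String × String)) :
    PySem.Dict String (PySem.Dict String (List (List (String × String)))) :=
  let main_cat := map_to_main_categories (pvGetCat task)
  let sub_cat := pvGetCat task
  -- if main_cat not in organized: organized[main_cat] = {}
  let organized := if organized.contains main_cat then organized else organized.insert main_cat PySem.Dict.empty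
  let inner := organized.getD main_cat PySem.Dict.empty
  -- if sub_cat not in organized[main_cat]: organized[main_cat][sub_cat] = []
  let inner := if inner.contains sub_cat then inner else inner.insert sub_cat []
  -- organized[main_cat][sub_cat].append(task)  (in-place: re-store with overwrite-in-place insert)
  let inner := inner.insert sub_cat (inner.getD sub_cat [] ++ [task])
  organized.insert main_cat inner

def organize_by_main_category (tasks : List (List (String × String))) :
    List (String × List (String × List (List (String × String)))) :=
  ((tasks.foldl orgStep PySem.Dict.empty).items).map (fun p => (p.1, p.2.items))

-- ===== PORT B =====
def organize_by_main_category_alt (tasks : List (List (String × String))) :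
    List (String × List (String × List (List (String × String)))) :=
  let cats := PySem.List.dedup (tasks.map pvGetCat)
  let mains := PySem.List.dedup (cats.map map_to_main_categories)
  mains.map (fun mc => (mc,
    (cats.filter (fun c => map_to_main_categories c == mc)).map
      (fun c => (c, tasks.filter (fun t => pvGetCat t == c)))))

-- ===== PRECONDITION & SPEC =====
-- Pre_ excludes exactly the inputs on which Python A raises KeyError: a task without a 'category' key.
def Pre_organize_by_main_category (tasks : List (List (String × String))) : Prop :=
  (tasks.all (fun t => (PySem.Dict.mk t).contains "category")) = true
instance (tasks : List (List (String × String))) : Decidable (Pre_organize_by_main_category tasks) := by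
  unfold Pre_organize_by_main_category; infer_instance
def pvWitness_organize_by_main_category : (List (List (String × String))) :=
  [[("category", "Logging"), ("title", "log a metric")], [("category", "Artifact basics")]]

def Spec_organize_by_main_category (tasks : List (List (String × String))) (out : List (String × List (String × List (List (String × String))))) : Prop := out = organize_by_main_category_alt tasks
instance (tasks : List (List (String × String))) (out : List (String × List (String × List (List (String × String))))) : Decidable (Spec_organize_by_main_category tasks out) := by
  unfold Spec_organize_by_main_category
  haveI : DecidableEq (List (String × List (List (String × String)))) := inferInstance
  haveI : DecidableEq (String × List (String × List (List (String × String)))) := inferInstance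
  infer_instance

-- ===== CLAIM (what is proved, stated in full; the proofs are below) =====
def Claim_equal_organize_by_main_category : Prop := ∀ (tasks : List (List (String × String))), Dom_organize_by_main_category tasks → Pre_organize_by_main_category tasks → Spec_organize_by_main_category tasks (organize_by_main_category tasks)

-- ===== LEMMAS AND PROOFS =====

theorem ofList_append_singleton {α : Type} [BEq α] [LawfulBEq α] (l : List α) (x : α) :
    PySem.Set.ofList (l ++ [x]) =
      if x ∈ l then PySem.Set.ofList l else PySem.Set.ofList l ++ [x] := by
  have h : PySem.Set.ofList (l ++ [x]) = PySem.Set.add (PySem.Set.ofList l) x := by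
    simp [PySem.Set.ofList, List.foldl_append]
  rw [h]
  simp [PySem.Set.add, PySem.Set.mem_ofList]

theorem ofList_filter {α : Type} [BEq α] [LawfulBEq α] (p : α → Bool) (l : List α) :
    PySem.Set.ofList (l.filter p) = (PySem.Set.ofList l).filter p := by
  induction l using List.reverseRecOn with
  | nil => rfl
  | append_singleton l x ih =>
    rw [List.filter_append, ofList_append_singleton]
    cases hp : p x with
    | false =>
      simp only [hp, List.filter_cons, List.filter_nil, Bool.false_eq_true, if_false, List.append_nil]
      split_ifs <;> simp [ih, hp]
    | true =>
      simp only [hp, List.filter_cons, List.filter_nil, if_true]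
      rw [ofList_append_singleton]
      by_cases hm : x ∈ l
      · simp [hm, hp, ih, List.mem_filter]
      · simp [hm, hp, ih, List.mem_filter]

theorem ofList_map_ofList {α β : Type} [BEq α] [LawfulBEq α] [BEq β] [LawfulBEq β]
    (f : α → β) (l : List α) :
    PySem.Set.ofList ((PySem.Set.ofList l).map f) = PySem.Set.ofList (l.map f) := by
  induction l using List.reverseRecOn with
  | nil => rfl
  | append_singleton l x ih =>
    rw [ofList_append_singleton, List.map_append, List.map_cons, List.map_nil,
        ofList_append_singleton]
    by_cases hm : x ∈ l
    · have h1 : f x ∈ l.map f := List.mem_map_of_mem hm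
      simp [hm, h1, ih]
    · simp only [hm, if_false]
      rw [List.map_append, List.map_cons, List.map_nil, ofList_append_singleton]
      have h1 : f x ∈ (PySem.Set.ofList l).map f ↔ f x ∈ l.map f := by
        simp [List.mem_map, PySem.Set.mem_ofList]
      by_cases h2 : f x ∈ l.map f
      · simp [h2, h1, ih]
      · simp [h2, h1, ih]

-- uniform one-insert form of A's loop body, used to run the Dict fold lemmas
def pvKey (t : List (String × String)) : String := map_to_main_categories (pvGetCat t)

def pvStep (d : PySem.Dict String (PySem.Dict String (List (List (String × String)))))
    (t : List (String × String)) :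
    PySem.Dict String (PySem.Dict String (List (List (String × String)))) :=
  d.insert (pvKey t)
    ((d.getD (pvKey t) PySem.Dict.empty).insert (pvGetCat t)
      ((d.getD (pvKey t) PySem.Dict.empty).getD (pvGetCat t) [] ++ [t]))

theorem orgStep_eq_pvStep : orgStep = pvStep := by
  funext d t
  simp only [orgStep, pvStep, pvKey]
  cases h1 : d.contains (map_to_main_categories (pvGetCat t)) with
  | true =>
    simp only [if_true]
    cases h2 : (d.getD (map_to_main_categories (pvGetCat t)) PySem.Dict.empty).contains (pvGetCat t) with
    | true => simp
    | false =>
      simp [PySem.Dict.insert_insert_self, PySem.Dict.getD_insert_self,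
            PySem.Dict.getD_of_not_contains _ _ h2]
  | false =>
    simp only [Bool.false_eq_true, if_false]
    rw [PySem.Dict.getD_insert_self, PySem.Dict.getD_of_not_contains _ _ h1]
    simp [PySem.Dict.contains_empty, PySem.Dict.insert_insert_self, PySem.Dict.getD_insert_self]

theorem keys_build (ts : List (List (String × String))) :
    (ts.foldl pvStep PySem.Dict.empty).keys = PySem.Set.ofList (ts.map pvKey) := by
  have h := PySem.Dict.keys_foldl_insert_key ts pvKey
      (fun d t => ((d.getD (pvKey t) PySem.Dict.empty).insert (pvGetCat t)
        ((d.getD (pvKey t) PySem.Dict.empty).getD (pvGetCat t) [] ++ [t]))) PySem.Dict.empty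
  calc (ts.foldl pvStep PySem.Dict.empty).keys
      = (List.foldl (fun d t => d.insert (pvKey t)
          ((d.getD (pvKey t) PySem.Dict.empty).insert (pvGetCat t)
            ((d.getD (pvKey t) PySem.Dict.empty).getD (pvGetCat t) [] ++ [t]))) PySem.Dict.empty ts).keys := rfl
    _ = PySem.Set.update PySem.Dict.empty.keys (ts.map pvKey) := h
    _ = PySem.Set.ofList (ts.map pvKey) := by
        simp [PySem.Dict.keys_empty, PySem.Set.update, PySem.Set.ofList]

theorem nodup_keys_build (ts : List (List (String × String))) :
    (ts.foldl pvStep PySem.Dict.empty).keys.Nodup := by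
  have h := PySem.Dict.nodup_keys_foldl_insert_key ts pvKey
      (fun d t => ((d.getD (pvKey t) PySem.Dict.empty).insert (pvGetCat t)
        ((d.getD (pvKey t) PySem.Dict.empty).getD (pvGetCat t) [] ++ [t]))) PySem.Dict.empty
      (by simp [PySem.Dict.keys_empty])
  exact h

theorem getD_build (ts : List (List (String × String))) (c : String) :
    (((ts.foldl pvStep PySem.Dict.empty).getD (map_to_main_categories c) PySem.Dict.empty).getD c []) =
      ts.filter (fun t => pvGetCat t == c) := by
  induction ts using List.reverseRecOn with
  | nil => simp [PySem.Dict.getD_empty]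
  | append_singleton ts t ih =>
    rw [List.foldl_append, List.foldl_cons, List.foldl_nil, List.filter_append]
    simp only [pvStep, pvKey, List.filter_cons, List.filter_nil]
    by_cases hc : pvGetCat t = c
    · subst hc
      rw [PySem.Dict.getD_insert_self, PySem.Dict.getD_insert_self]
      simp [ih]
    · by_cases hk : map_to_main_categories c = map_to_main_categories (pvGetCat t)
      · rw [hk, PySem.Dict.getD_insert_self, PySem.Dict.getD_insert]
        simp [Ne.symm hc, hc, ← hk, ih]
      · rw [PySem.Dict.getD_insert]
        simp [hk, hc, ih]

theorem inner_keys_build (ts : List (List (String × String))) (mc : String) :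
    ((ts.foldl pvStep PySem.Dict.empty).getD mc PySem.Dict.empty).keys =
      PySem.Set.ofList ((ts.map pvGetCat).filter (fun c => map_to_main_categories c == mc)) := by
  induction ts using List.reverseRecOn with
  | nil => simp [PySem.Dict.getD_empty, PySem.Dict.keys_empty]
  | append_singleton ts t ih =>
    rw [List.foldl_append, List.foldl_cons, List.foldl_nil, List.map_append, List.filter_append]
    simp only [pvStep, pvKey, List.map_cons, List.map_nil, List.filter_cons, List.filter_nil]
    by_cases hk : map_to_main_categories (pvGetCat t) = mc
    · rw [hk, PySem.Dict.getD_insert_self]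
      have hmem : ((ts.foldl pvStep PySem.Dict.empty).getD mc PySem.Dict.empty).contains (pvGetCat t) = true
          ↔ pvGetCat t ∈ (ts.map pvGetCat).filter (fun c => map_to_main_categories c == mc) := by
        rw [PySem.Dict.contains_iff_mem_keys, ih, PySem.Set.mem_ofList]
      cases hcon : ((ts.foldl pvStep PySem.Dict.empty).getD mc PySem.Dict.empty).contains (pvGetCat t) with
      | true =>
        rw [PySem.Dict.keys_insert_of_contains _ _ hcon, ih]
        have : pvGetCat t ∈ (ts.map pvGetCat).filter (fun c => map_to_main_categories c == mc) :=
          hmem.mp hcon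
        simp [ofList_append_singleton, this]
      | false =>
        rw [PySem.Dict.keys_insert_of_not_contains _ _ hcon, ih]
        have : pvGetCat t ∉ (ts.map pvGetCat).filter (fun c => map_to_main_categories c == mc) := by
          intro h; rw [← hmem] at h; simp [hcon] at h
        simp [ofList_append_singleton, this]
    · rw [PySem.Dict.getD_insert, if_neg (fun h : mc = map_to_main_categories (pvGetCat t) => hk h.symm)]
      simp [hk, ih]

theorem main_equiv (tasks : List (List (String × String))) :
    organize_by_main_category tasks = organize_by_main_category_alt tasks := by
  unfold organize_by_main_category organize_by_main_category_alt
  rw [orgStep_eq_pvStep]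
  simp only [PySem.List.dedup_eq_ofList]
  rw [PySem.Dict.items_eq_map_keys _ (nodup_keys_build tasks) PySem.Dict.empty, List.map_map,
      keys_build]
  have houter : PySem.Set.ofList ((PySem.Set.ofList (tasks.map pvGetCat)).map map_to_main_categories)
      = PySem.Set.ofList (tasks.map pvKey) := by
    rw [ofList_map_ofList, List.map_map]
    rfl
  rw [houter]
  apply List.map_congr_left
  intro mc hmc
  simp only [Function.comp]
  have hinner_nodup : ((tasks.foldl pvStep PySem.Dict.empty).getD mc PySem.Dict.empty).keys.Nodup := by
    rw [inner_keys_build]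
    exact PySem.Set.nodup_ofList _
  rw [PySem.Dict.items_eq_map_keys _ hinner_nodup [], inner_keys_build, ofList_filter]
  refine congrArg (fun z => (mc, z)) ?_
  apply List.map_congr_left
  intro c hc
  have hpred : map_to_main_categories c = mc := by
    have h2 : (map_to_main_categories c == mc) = true := by
      have hmemf : c ∈ (PySem.Set.ofList (tasks.map pvGetCat)).filter (fun c => map_to_main_categories c == mc) := hc
      simpa using (List.mem_filter.mp hmemf).2
    exact eq_of_beq h2
  refine congrArg (fun z => (c, z)) ?_
  rw [← hpred]
  exact getD_build tasks c

-- ===== VERDICT (by name: the statement is the Claim_ definition above) =====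
theorem organize_by_main_category_spec : Claim_equal_organize_by_main_category := by
  intro tasks _ _
  exact main_equiv tasks
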